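-- pv_equiv track=rewrite | github.com/arbiter07/py-algorithm | step21-25.py | solution_21
-- ===== SOURCE A (Python) =====
-- def solution_21(want, number, discount):
--     dic = {}
--     for i, product in enumerate(want):
--         dic[product] = number[i]
--
--     result = 0
--
--     for i in range(len(discount) - 9):  # 10일 기간이기 때문에 범위 수정
--         temp_dic = dic.copy()  # 매번 초기화를 위해 dic 복사본 사용
--         isPossible = True
--
--         for j in range(i, i + 10):
--             if discount[j] in temp_dic:
--                 temp_dic[discount[j]] -= 1
--                 if temp_dic[discount[j]] < 0:
--                     isPossible = False
--                     break
--
--         if isPossible and all(value == 0 for value in temp_dic.values()):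
--             result += 1
--
--     return result
-- ===== SOURCE B (Python) =====
-- def solution_21(want, number, discount):
--     # Sliding window over discount: a count map of wanted products in the
--     # current 10-day window plus a 'matched' counter of products whose
--     # window count equals the desired count, updated incrementally.
--     target = {}
--     for product, n in zip(want, number):
--         target[product] = n
--
--     if len(discount) < 10:
--         return 0
--
--     k = len(target)
--     cnt = dict.fromkeys(target, 0)
--     matched = sum(1 for p in target if target[p] == 0)
--     result = 0
--
--     for i, item in enumerate(discount):
--         if item in cnt:
--             if cnt[item] == target[item]:
--                 matched -= 1
--             cnt[item] += 1
--             if cnt[item] == target[item]: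
--                 matched += 1
--         if i >= 10:
--             out = discount[i - 10]
--             if out in cnt:
--                 if cnt[out] == target[out]:
--                     matched -= 1
--                 cnt[out] -= 1
--                 if cnt[out] == target[out]:
--                     matched += 1
--         if i >= 9 and matched == k:
--             result += 1
--     return result
-- ===== Notes on version B (the rewrite author's own statement) =====
-- stated objective: faster
-- what changed: A re-scans every 10-day window with a fresh copy of the wanted-counts dict (decrement, break on overshoot, then check all zeros); B makes a single sliding-window pass keeping a count map of wanted products and a 'matched' counter of products whose window count equals the wanted count, updated incrementally as one day enters and one leaves the window.
-- outside the precondition, e.g. on solution_21(['a', 'b'], [1], ['a']): A raises IndexError, B returns 0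
import Mathlib
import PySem

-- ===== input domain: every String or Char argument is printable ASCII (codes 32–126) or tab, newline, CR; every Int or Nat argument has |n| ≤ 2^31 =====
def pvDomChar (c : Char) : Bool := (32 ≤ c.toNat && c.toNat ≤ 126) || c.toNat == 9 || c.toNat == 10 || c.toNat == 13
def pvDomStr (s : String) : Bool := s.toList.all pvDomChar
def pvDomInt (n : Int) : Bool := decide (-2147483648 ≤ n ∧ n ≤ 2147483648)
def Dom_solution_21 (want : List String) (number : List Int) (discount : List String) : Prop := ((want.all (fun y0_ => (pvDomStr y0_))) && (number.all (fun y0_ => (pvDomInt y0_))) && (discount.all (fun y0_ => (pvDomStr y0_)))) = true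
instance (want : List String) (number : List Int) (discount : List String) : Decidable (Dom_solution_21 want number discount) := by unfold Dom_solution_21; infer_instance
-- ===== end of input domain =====

-- B replaces A's per-window dict-copy-and-decrement scan by a single sliding-window pass
-- (count map + matched-products counter, updated incrementally); objective: faster.

-- ===== PORT A =====
-- first loop: dic[product] = number[i]
def aDic (want : List String) (number : List Int) : PySem.Dict String Int :=
  (PySem.List.enumerate want 0).foldl
    (fun d p => d.insert p.2 (PySem.List.pyGetD number p.1 0)) PySem.Dict.empty

-- inner 10-day loop of A, with the break modelled by the Bool flag (state frozen once false)
def aInner (dic : PySem.Dict String Int) (discount : List String) (i : Int) :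
    PySem.Dict String Int × Bool :=
  (PySem.List.pyRange i (i + 10) 1).foldl
    (fun st j =>
      if st.2 then
        let x := PySem.List.pyGetD discount j ""
        if st.1.contains x then
          let t := st.1.insert x (st.1.getD x 0 - 1)
          if t.getD x 0 < 0 then (t, false) else (t, true)
        else st
      else st)
    (dic, true)

def solution_21 (want : List String) (number : List Int) (discount : List String) : Int :=
  let dic := aDic want number
  (PySem.List.pyRange 0 ((discount.length : Int) - 9) 1).foldl
    (fun result i =>
      let r := aInner dic discount i
      if r.2 && r.1.values.all (fun v => v == 0) then result + 1 else result)
    0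

-- ===== PORT B =====
-- target = dict(zip(want, number))
def bTarget (want : List String) (number : List Int) : PySem.Dict String Int :=
  (want.zip number).foldl (fun d p => d.insert p.1 p.2) PySem.Dict.empty

-- body of B's single pass: add discount[i], at i>=10 drop discount[i-10], keeping
-- `matched` (= number of products whose window count equals the wanted count) in step
def bStep (target : PySem.Dict String Int) (discount : List String) (k : Int)
    (st : PySem.Dict String Int × Int × Int) (pr : Int × String) :
    PySem.Dict String Int × Int × Int :=
  let cnt := st.1
  let matched := st.2.1
  let result := st.2.2
  let i := pr.1
  let item := pr.2
  let s1 :=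
    if cnt.contains item then
      let m1 := if cnt.getD item 0 == target.getD item 0 then matched - 1 else matched
      let cnt1 := cnt.insert item (cnt.getD item 0 + 1)
      let m2 := if cnt1.getD item 0 == target.getD item 0 then m1 + 1 else m1
      (cnt1, m2)
    else (cnt, matched)
  let s2 :=
    if 10 ≤ i then
      let out := PySem.List.pyGetD discount (i - 10) ""
      if s1.1.contains out then
        let m1 := if s1.1.getD out 0 == target.getD out 0 then s1.2 - 1 else s1.2
        let cnt1 := s1.1.insert out (s1.1.getD out 0 - 1)
        let m2 := if cnt1.getD out 0 == target.getD out 0 then m1 + 1 else m1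
        (cnt1, m2)
      else s1
    else s1
  let result' := if (decide (9 ≤ i)) && (s2.2 == k) then result + 1 else result
  (s2.1, s2.2, result')

def solution_21_alt (want : List String) (number : List Int) (discount : List String) : Int :=
  let target := bTarget want number
  if discount.length < 10 then 0
  else
    let k : Int := (target.size : Int)
    let cnt0 := target.keys.foldl (fun d p => d.insert p (0 : Int)) PySem.Dict.empty
    let matched0 :=
      target.keys.foldl (fun a p => if target.getD p 0 == 0 then a + 1 else a) (0 : Int)
    let st := (PySem.List.enumerate discount 0).foldl (bStep target discount k)
      (cnt0, matched0, 0)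
    st.2.2

-- ===== PRECONDITION & SPEC =====
-- Pre_ excludes only the inputs where A raises IndexError (number shorter than want).
def Pre_solution_21 (want : List String) (number : List Int) (discount : List String) : Prop :=
  want.length ≤ number.length
instance (want : List String) (number : List Int) (discount : List String) :
    Decidable (Pre_solution_21 want number discount) := by unfold Pre_solution_21; infer_instance

def pvWitness_solution_21 : List String × List Int × List String :=
  (["a"], [1], ["a", "b", "a", "a", "a", "a", "a", "a", "a", "a"])

def Spec_solution_21 (want : List String) (number : List Int) (discount : List String) (out : Int) : Prop := out = solution_21_alt want number discount
instance (want : List String) (number : List Int) (discount : List String) (out : Int) : Decidable (Spec_solution_21 want number discount out) := by unfold Spec_solution_21; infer_instance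

-- ===== CLAIM (what is proved, stated in full; the proofs are below) =====
def Claim_equal_solution_21 : Prop := ∀ (want : List String) (number : List Int) (discount : List String), Dom_solution_21 want number discount → Pre_solution_21 want number discount → Spec_solution_21 want number discount (solution_21 want number discount)


-- ===== LEMMAS AND PROOFS =====

-- the common specification: number of windows whose per-product counts match exactly
def goodW (t : PySem.Dict String Int) (w : List String) : Bool :=
  t.keys.all (fun p => ((w.count p : Int) == t.getD p 0))

def specN (t : PySem.Dict String Int) (discount : List String) : Nat :=
  (List.range (discount.length - 9)).countP (fun i => goodW t ((discount.drop i).take 10))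

-- A's inner-loop body as a step over the window element itself
def aStep (st : PySem.Dict String Int × Bool) (x : String) : PySem.Dict String Int × Bool :=
  if st.2 then
    if st.1.contains x then
      let t := st.1.insert x (st.1.getD x 0 - 1)
      if t.getD x 0 < 0 then (t, false) else (t, true)
    else st
  else st

theorem aDic_aux (number : List Int) : ∀ (want : List String) (k : Nat) (d : PySem.Dict String Int),
    k + want.length ≤ number.length →
    (PySem.List.enumerate want (k : Int)).foldl
      (fun d p => d.insert p.2 (PySem.List.pyGetD number p.1 0)) d
    = (want.zip (number.drop k)).foldl (fun d p => d.insert p.1 p.2) d := by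
  intro want
  induction want with
  | nil => intro k d h; simp [PySem.List.enumerate_nil]
  | cons w ws ih =>
    intro k d h
    have hk : k < number.length := by simp at h; omega
    rw [PySem.List.enumerate_cons]
    rw [← List.getElem_cons_drop hk]
    simp only [List.zip_cons_cons, List.foldl_cons]
    rw [PySem.List.pyGetD_natCast, List.getD_eq_getElem _ _ hk]
    have : (k : Int) + 1 = ((k + 1 : Nat) : Int) := by push_cast; ring
    rw [this, ih (k+1) _ (by simp at h ⊢; omega)]

theorem aDic_eq (want : List String) (number : List Int) (h : want.length ≤ number.length) :
    aDic want number = bTarget want number := by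
  unfold aDic bTarget
  have h0 := aDic_aux number want 0 PySem.Dict.empty (by simpa using h)
  simpa using h0

theorem foldl_aStep_false (w : List String) (d : PySem.Dict String Int) :
    w.foldl aStep (d, false) = (d, false) := by
  induction w generalizing d with
  | nil => rfl
  | cons x xs ih => simpa [aStep] using ih d

theorem aInner_spec (w : List String) : ∀ (d : PySem.Dict String Int), d.keys.Nodup →
    (((w.foldl aStep (d, true)).2 &&
      (w.foldl aStep (d, true)).1.values.all (fun v => v == 0)) = true
     ↔ ∀ p ∈ d.keys, (w.count p : Int) = d.getD p 0) := by
  induction w with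
  | nil =>
    intro d hnd
    simp only [List.foldl_nil, Bool.true_and]
    rw [PySem.Dict.values_eq_map_keys d hnd 0]
    simp only [List.all_map, List.all_eq_true, Function.comp, beq_iff_eq, List.count_nil,
      Nat.cast_zero]
    exact ⟨fun h p hp => (h p hp).symm, fun h p hp => (h p hp).symm⟩
  | cons x rest ih =>
    intro d hnd
    by_cases hc : d.contains x = true
    · have hx : x ∈ d.keys := (PySem.Dict.contains_iff_mem_keys d x).1 hc
      have hkeys : (d.insert x (d.getD x 0 - 1)).keys = d.keys :=
        PySem.Dict.keys_insert_of_contains d _ hc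
      have hndt : (d.insert x (d.getD x 0 - 1)).keys.Nodup := hkeys ▸ hnd
      have htx : (d.insert x (d.getD x 0 - 1)).getD x 0 = d.getD x 0 - 1 := by
        rw [PySem.Dict.getD_insert]; simp
      have htp : ∀ p, p ≠ x → (d.insert x (d.getD x 0 - 1)).getD p 0 = d.getD p 0 := by
        intro p hp; rw [PySem.Dict.getD_insert]; simp [hp]
      by_cases hneg : d.getD x 0 - 1 < 0
      · have hstep : aStep (d, true) x = (d.insert x (d.getD x 0 - 1), false) := by
          simp only [aStep, hc, htx, if_true, hneg]
        rw [List.foldl_cons, hstep, foldl_aStep_false]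
        simp only [Bool.false_and, Bool.false_eq_true, false_iff]
        intro hall
        have h1 := hall x hx
        have hcx : 1 ≤ (x :: rest).count x := by simp
        have hcx' : (1 : Int) ≤ ((x :: rest).count x : Int) := by exact_mod_cast hcx
        omega
      · have hstep : aStep (d, true) x = (d.insert x (d.getD x 0 - 1), true) := by
          simp only [aStep, hc, htx, if_true, hneg]
          simp
        rw [List.foldl_cons, hstep, ih _ hndt]
        have hcountx : ((x :: rest).count x : Int) = (rest.count x : Int) + 1 := by
          rw [List.count_cons_self]; push_cast; ring
        constructor
        · intro hall p hp
          have h1 := hall p (hkeys.symm ▸ hp)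
          by_cases hpx : p = x
          · subst hpx; rw [htx] at h1; rw [List.count_cons_self]; push_cast; omega
          · rw [htp p hpx] at h1; rw [List.count_cons_of_ne (Ne.symm hpx)]; exact h1
        · intro hall p hp
          have h1 := hall p (hkeys ▸ hp)
          by_cases hpx : p = x
          · subst hpx; rw [htx]; rw [hcountx] at h1; omega
          · rw [htp p hpx]; rw [List.count_cons_of_ne (Ne.symm hpx)] at h1; exact h1
    · have hstep : aStep (d, true) x = (d, true) := by
        simp only [aStep, hc]
        simp
      rw [List.foldl_cons, hstep, ih d hnd]
      have hx : x ∉ d.keys := fun h => hc ((PySem.Dict.contains_iff_mem_keys d x).2 h)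
      have hcount : ∀ p ∈ d.keys, (x :: rest).count p = rest.count p := by
        intro p hp
        exact List.count_cons_of_ne (fun h => hx (by rw [h]; exact hp))
      constructor
      · intro hall p hp; rw [hcount p hp]; exact hall p hp
      · intro hall p hp
        have h1 := hall p hp; rw [hcount p hp] at h1; exact h1

theorem aInner_aux (discount : List String) : ∀ (c start : Nat) (st : PySem.Dict String Int × Bool),
    start + c ≤ discount.length →
    (PySem.List.pyRange (start : Int) ((start : Int) + c) 1).foldl
      (fun st j => aStep st (PySem.List.pyGetD discount j "")) st
    = ((discount.drop start).take c).foldl aStep st := by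
  intro c
  induction c with
  | zero => intro start st h; simp [PySem.List.pyRange_one_eq_nil]
  | succ c ih =>
    intro start st h
    have hs : start < discount.length := by omega
    rw [PySem.List.pyRange_one_cons (by push_cast; omega)]
    rw [← List.getElem_cons_drop hs, List.take_succ_cons]
    simp only [List.foldl_cons]
    rw [PySem.List.pyGetD_natCast, List.getD_eq_getElem _ _ hs]
    have h1 : (start : Int) + 1 = ((start + 1 : Nat) : Int) := by push_cast; ring
    have h2 : (start : Int) + ((c + 1 : Nat) : Int) = ((start + 1 : Nat) : Int) + (c : Nat) := by push_cast; ring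
    rw [h2, h1, ih (start + 1) _ (by omega)]

theorem aInner_eq_window (dic : PySem.Dict String Int) (discount : List String) (m : Nat)
    (hm : m + 10 ≤ discount.length) :
    aInner dic discount (m : Int) = ((discount.drop m).take 10).foldl aStep (dic, true) := by
  have := aInner_aux discount 10 m (dic, true) (by omega)
  rw [← this]
  rfl

theorem bTarget_nodup (want : List String) (number : List Int) :
    (bTarget want number).keys.Nodup := by
  unfold bTarget
  exact PySem.Dict.nodup_keys_foldl_insert_key (want.zip number) Prod.fst (fun _ p => p.2)
    PySem.Dict.empty PySem.Dict.nodup_keys_empty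

theorem solution_21_eq_spec (want : List String) (number : List Int) (discount : List String)
    (h : want.length ≤ number.length) :
    solution_21 want number discount = (specN (bTarget want number) discount : Int) := by
  have hnd := bTarget_nodup want number
  unfold solution_21
  rw [aDic_eq _ _ h]
  rw [PySem.List.pyRange_one]
  simp only [Int.sub_zero, List.foldl_map]
  rw [PySem.List.foldl_count_if
    (fun (k : Nat) =>
      (aInner (bTarget want number) discount ((0 : Int) + k)).2 &&
      (aInner (bTarget want number) discount ((0 : Int) + k)).1.values.all (fun v => v == 0))
    (List.range ((discount.length : Int) - 9).toNat) 0]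
  rw [Int.zero_add]
  unfold specN
  have hlen : ((discount.length : Int) - 9).toNat = discount.length - 9 := by omega
  rw [hlen]
  congr 1
  apply List.countP_congr
  intro k hk
  rw [List.mem_range] at hk
  have hk10 : k + 10 ≤ discount.length := by omega
  have hz : ((0 : Int) + (k : Int)) = ((k : Nat) : Int) := by ring
  rw [hz, aInner_eq_window _ _ _ hk10]
  rw [Bool.eq_iff_iff]
  rw [aInner_spec _ _ hnd]
  unfold goodW
  simp [List.all_eq_true]

-- B-side: window of the last ≤10 elements after m steps, and counting lemmas
def winOf (discount : List String) (m : Nat) : List String :=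
  (discount.take m).drop (m - 10)

theorem win_zero (discount : List String) : winOf discount 0 = [] := by simp [winOf]

theorem win_succ_small (discount : List String) (m : Nat) (h10 : m < 10)
    (hm : m < discount.length) :
    winOf discount (m + 1) = winOf discount m ++ [discount.getD m ""] := by
  unfold winOf
  have h1 : m - 10 = 0 := by omega
  have h2 : m + 1 - 10 = 0 := by omega
  rw [h1, h2, List.drop_zero, List.drop_zero, List.take_add_one]
  rw [List.getElem?_eq_getElem hm]
  simp [List.getD, List.getElem?_eq_getElem hm]

theorem win_succ_large (discount : List String) (m : Nat) (h10 : 10 ≤ m)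
    (hm : m < discount.length) :
    winOf discount m ++ [discount.getD m ""]
      = discount.getD (m - 10) "" :: winOf discount (m + 1) := by
  unfold winOf
  have hlen : m - 10 ≤ (discount.take m).length := by simp; omega
  have e1 : (discount.take m).drop (m - 10) ++ [discount.getD m ""]
      = (discount.take (m + 1)).drop (m - 10) := by
    rw [List.take_add_one, List.getElem?_eq_getElem hm]
    rw [List.drop_append_of_le_length hlen]
    simp [List.getD, List.getElem?_eq_getElem hm]
  rw [e1]
  have hm10 : m - 10 < (discount.take (m + 1)).length := by simp; omega
  rw [← List.getElem_cons_drop hm10]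
  have h2 : m - 10 + 1 = m + 1 - 10 := by omega
  rw [h2]
  congr 1
  rw [List.getElem_take]
  rw [List.getD_eq_getElem _ _ (by omega)]

theorem countP_shift (P : Nat → Bool) : ∀ (n : Nat),
    (List.range n).countP (fun j => decide (9 ≤ j) && P (j - 9))
      = (List.range (n - 9)).countP P := by
  intro n
  induction n with
  | zero => simp
  | succ n ih =>
    rw [List.range_succ, List.countP_append, ih]
    by_cases h9 : 9 ≤ n
    · have : n + 1 - 9 = (n - 9) + 1 := by omega
      rw [this, List.range_succ, List.countP_append]
      simp only [List.countP_cons, List.countP_nil]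
      have : (decide (9 ≤ n) && P (n - 9)) = P (n - 9) := by simp [h9]
      rw [this]
    · have h1 : n + 1 - 9 = 0 := by omega
      have h2 : n - 9 = 0 := by omega
      rw [h1, h2]
      simp [Nat.lt_of_not_le (fun h => h9 h)]

theorem enum_take_succ (discount : List String) (m : Nat) (hm : m < discount.length) :
    (PySem.List.enumerate discount 0).take (m + 1)
      = (PySem.List.enumerate discount 0).take m ++ [((m : Int), discount.getD m "")] := by
  rw [List.take_add_one]
  congr 1
  have hlen : m < (PySem.List.enumerate discount 0).length := by
    rw [PySem.List.length_enumerate]; exact hm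
  rw [List.getElem?_eq_getElem hlen]
  rw [PySem.List.getElem_enumerate]
  simp [List.getD, List.getElem?_eq_getElem hm]

theorem countP_update (K : List String) (hK : K.Nodup) (x : String) (hx : x ∈ K)
    (f f' g : String → Int) (hoff : ∀ p ∈ K, p ≠ x → f' p = f p) :
    (K.countP (fun p => f' p == g p) : Int)
      = (K.countP (fun p => f p == g p) : Int)
        - (if f x == g x then 1 else 0) + (if f' x == g x then 1 else 0) := by
  obtain ⟨K1, K2, rfl⟩ := List.append_of_mem hx
  have hnd := hK
  rw [List.nodup_append] at hnd
  have hx1 : x ∉ K1 := fun h => hnd.2.2 x h x (by simp) rfl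
  have hx2 : x ∉ K2 := by
    have h2 := hnd.2.1
    rw [List.nodup_cons] at h2
    exact h2.1
  have h1 : K1.countP (fun p => f' p == g p) = K1.countP (fun p => f p == g p) := by
    apply List.countP_congr
    intro p hp
    rw [hoff p (by simp [hp]) (fun h => hx1 (h ▸ hp))]
  have h2 : K2.countP (fun p => f' p == g p) = K2.countP (fun p => f p == g p) := by
    apply List.countP_congr
    intro p hp
    rw [hoff p (by simp [hp]) (fun h => hx2 (h ▸ hp))]
  simp only [List.countP_append, List.countP_cons, h1, h2]
  push_cast
  split_ifs <;> omega

def upd (target : PySem.Dict String Int) (x : String) (δ : Int)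
    (s : PySem.Dict String Int × Int) : PySem.Dict String Int × Int :=
  if s.1.contains x then
    let m1 := if s.1.getD x 0 == target.getD x 0 then s.2 - 1 else s.2
    let cnt1 := s.1.insert x (s.1.getD x 0 + δ)
    let m2 := if cnt1.getD x 0 == target.getD x 0 then m1 + 1 else m1
    (cnt1, m2)
  else s

theorem upd_inv (target : PySem.Dict String Int) (hK : target.keys.Nodup)
    (s : PySem.Dict String Int × Int) (c : String → Int) (x : String) (δ : Int)
    (hkeys : s.1.keys = target.keys)
    (hc : ∀ p ∈ target.keys, s.1.getD p 0 = c p)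
    (hm : s.2 = (target.keys.countP (fun p => c p == target.getD p 0) : Int)) :
    (upd target x δ s).1.keys = target.keys ∧
    (∀ p ∈ target.keys,
      (upd target x δ s).1.getD p 0 = if p = x then c p + δ else c p) ∧
    (upd target x δ s).2
      = (target.keys.countP
          (fun p => (if p = x then c p + δ else c p) == target.getD p 0) : Int) := by
  by_cases hmem : x ∈ target.keys
  · have hcon : s.1.contains x = true := by
      rw [PySem.Dict.contains_iff_mem_keys, hkeys]; exact hmem
    have h0 : s.1.getD x 0 = c x := hc x hmem
    have hstep : upd target x δ s =
        (s.1.insert x (c x + δ),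
         if c x + δ == target.getD x 0 then
           (if c x == target.getD x 0 then s.2 - 1 else s.2) + 1
         else (if c x == target.getD x 0 then s.2 - 1 else s.2)) := by
      simp only [upd, hcon, if_true, h0, PySem.Dict.getD_insert]
    rw [hstep]
    refine ⟨?_, ?_, ?_⟩
    · rw [PySem.Dict.keys_insert_of_contains _ _ hcon, hkeys]
    · intro p hp
      rw [PySem.Dict.getD_insert]
      by_cases hpx : p = x
      · subst hpx; simp
      · simp [hpx, hc p hp]
    · have hL1 := countP_update target.keys hK x hmem c
        (fun p => if p = x then c p + δ else c p) (fun p => target.getD p 0)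
        (fun p _ hpx => by simp [hpx])
      beta_reduce at hL1
      simp only [if_pos rfl] at hL1
      rw [hm]
      rw [hL1]
      split_ifs <;> omega
  · have hcon : s.1.contains x = false := by
      rw [← Bool.not_eq_true, PySem.Dict.contains_iff_mem_keys, hkeys]; exact hmem
    have hstep : upd target x δ s = s := by simp [upd, hcon]
    rw [hstep]
    refine ⟨hkeys, ?_, ?_⟩
    · intro p hp
      have hpx : p ≠ x := fun h => hmem (h ▸ hp)
      simp [hpx, hc p hp]
    · rw [hm]
      congr 1
      apply List.countP_congr
      intro p hp
      have hpx : p ≠ x := fun h => hmem (h ▸ hp)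
      simp [hpx]

theorem bStep_eq (target : PySem.Dict String Int) (discount : List String) (k : Int)
    (st : PySem.Dict String Int × Int × Int) (i : Int) (item : String) :
    bStep target discount k st (i, item) =
    ((if 10 ≤ i then
        upd target (PySem.List.pyGetD discount (i - 10) "") (-1)
          (upd target item 1 (st.1, st.2.1))
      else upd target item 1 (st.1, st.2.1)).1,
     (if 10 ≤ i then
        upd target (PySem.List.pyGetD discount (i - 10) "") (-1)
          (upd target item 1 (st.1, st.2.1))
      else upd target item 1 (st.1, st.2.1)).2,
     if (decide (9 ≤ i)) &&
        ((if 10 ≤ i then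
            upd target (PySem.List.pyGetD discount (i - 10) "") (-1)
              (upd target item 1 (st.1, st.2.1))
          else upd target item 1 (st.1, st.2.1)).2 == k)
     then st.2.2 + 1 else st.2.2) := by
  simp only [bStep, upd, sub_eq_add_neg]

theorem count_append_single (w : List String) (x p : String) :
    ((w ++ [x]).count p : Int) = if p = x then (w.count p : Int) + 1 else (w.count p : Int) := by
  rw [List.count_append]
  by_cases hpx : p = x
  · subst hpx; simp
  · simp [Ne.symm hpx, hpx]

theorem bStep_inv (target : PySem.Dict String Int) (discount : List String)
    (hK : target.keys.Nodup) (m : Nat) (hm : m < discount.length)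
    (cnt : PySem.Dict String Int) (matched result : Int)
    (hkeys : cnt.keys = target.keys)
    (hc : ∀ p ∈ target.keys, cnt.getD p 0 = ((winOf discount m).count p : Int))
    (hmat : matched = (target.keys.countP
      (fun p => ((winOf discount m).count p : Int) == target.getD p 0) : Int))
    (hres : result = ((List.range m).countP
      (fun j => decide (9 ≤ j) && goodW target (winOf discount (j + 1))) : Int)) :
    ((bStep target discount ((target.keys.length : Int)) (cnt, matched, result)
        ((m : Int), discount.getD m "")).1.keys = target.keys) ∧
    (∀ p ∈ target.keys,
      (bStep target discount ((target.keys.length : Int)) (cnt, matched, result)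
        ((m : Int), discount.getD m "")).1.getD p 0
        = ((winOf discount (m + 1)).count p : Int)) ∧
    ((bStep target discount ((target.keys.length : Int)) (cnt, matched, result)
        ((m : Int), discount.getD m "")).2.1
      = (target.keys.countP
          (fun p => ((winOf discount (m + 1)).count p : Int) == target.getD p 0) : Int)) ∧
    ((bStep target discount ((target.keys.length : Int)) (cnt, matched, result)
        ((m : Int), discount.getD m "")).2.2
      = ((List.range (m + 1)).countP
          (fun j => decide (9 ≤ j) && goodW target (winOf discount (j + 1))) : Int)) := by
  rw [bStep_eq]
  have h1 := upd_inv target hK (cnt, matched)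
    (fun p => ((winOf discount m).count p : Int)) (discount.getD m "") 1 hkeys hc hmat
  beta_reduce at h1
  set x := discount.getD m "" with hxdef
  -- the state after the two count updates, and the counts it realises
  by_cases h10 : 10 ≤ m
  · -- removal branch taken
    have h10i : (10 : Int) ≤ (m : Int) := by exact_mod_cast h10
    have hpg : PySem.List.pyGetD discount ((m : Int) - 10) "" = discount.getD (m - 10) "" := by
      have : (m : Int) - 10 = ((m - 10 : Nat) : Int) := by omega
      rw [this, PySem.List.pyGetD_natCast]
    set y := discount.getD (m - 10) "" with hydef
    have h2 := upd_inv target hK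
      (upd target x 1 (cnt, matched))
      (fun p => if p = x then ((winOf discount m).count p : Int) + 1
                else ((winOf discount m).count p : Int)) y (-1) h1.1 h1.2.1 h1.2.2
    beta_reduce at h2
    have hwin : ∀ p, ((winOf discount (m + 1)).count p : Int)
        = if p = y then
            (if p = x then ((winOf discount m).count p : Int) + 1
             else ((winOf discount m).count p : Int)) + (-1)
          else (if p = x then ((winOf discount m).count p : Int) + 1
                else ((winOf discount m).count p : Int)) := by
      intro p
      have hw1 := count_append_single (winOf discount m) x p
      rw [win_succ_large discount m h10 hm] at hw1
      rw [← hydef] at hw1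
      by_cases hpy : p = y
      · rw [if_pos hpy]
        rw [← hpy] at hw1
        rw [List.count_cons_self] at hw1
        push_cast at hw1
        omega
      · rw [List.count_cons_of_ne (Ne.symm hpy)] at hw1
        rw [if_neg hpy]
        exact hw1
    have hbranch : (if 10 ≤ (m : Int) then
        upd target (PySem.List.pyGetD discount ((m : Int) - 10) "") (-1)
          (upd target x 1 (cnt, matched))
      else upd target x 1 (cnt, matched))
        = upd target y (-1) (upd target x 1 (cnt, matched)) := by
      rw [if_pos h10i, hpg]
    rw [hbranch]
    have hkeys2 := h2.1
    have hc2 : ∀ p ∈ target.keys,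
        (upd target y (-1) (upd target x 1 (cnt, matched))).1.getD p 0
          = ((winOf discount (m + 1)).count p : Int) := by
      intro p hp
      rw [h2.2.1 p hp, hwin p]
    have hm2 : (upd target y (-1) (upd target x 1 (cnt, matched))).2
        = (target.keys.countP
            (fun p => ((winOf discount (m + 1)).count p : Int) == target.getD p 0) : Int) := by
      rw [h2.2.2]
      congr 1
      apply List.countP_congr
      intro p hp
      rw [hwin p]
    refine ⟨hkeys2, hc2, hm2, ?_⟩
    -- result component
    rw [List.range_succ, List.countP_append]
    push_cast
    rw [← hres]
    simp only [List.countP_cons, List.countP_nil]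
    have hcond : ((decide (9 ≤ (m : Int))) &&
        ((upd target y (-1) (upd target x 1 (cnt, matched))).2 == ((target.keys.length : Nat) : Int)))
        = (decide (9 ≤ m) && goodW target (winOf discount (m + 1))) := by
      have e9 : decide (9 ≤ (m : Int)) = decide (9 ≤ m) := by
        simp
      rw [e9, hm2]
      congr 1
      rw [Bool.eq_iff_iff]
      simp only [beq_iff_eq, Int.natCast_inj]
      rw [List.countP_eq_length]
      unfold goodW
      simp [List.all_eq_true]
    rw [hcond]
    split_ifs <;> simp
  · -- no removal
    have h10i : ¬ ((10 : Int) ≤ (m : Int)) := by exact_mod_cast h10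
    have hwin : winOf discount (m + 1) = winOf discount m ++ [x] :=
      win_succ_small discount m (by omega) hm
    have hwc : ∀ p, ((winOf discount (m + 1)).count p : Int)
        = if p = x then ((winOf discount m).count p : Int) + 1
          else ((winOf discount m).count p : Int) := by
      intro p
      rw [hwin]
      exact count_append_single _ _ _
    rw [if_neg h10i]
    have hc2 : ∀ p ∈ target.keys,
        (upd target x 1 (cnt, matched)).1.getD p 0
          = ((winOf discount (m + 1)).count p : Int) := by
      intro p hp
      rw [h1.2.1 p hp, hwc p]
    have hm2 : (upd target x 1 (cnt, matched)).2
        = (target.keys.countP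
            (fun p => ((winOf discount (m + 1)).count p : Int) == target.getD p 0) : Int) := by
      rw [h1.2.2]
      congr 1
      apply List.countP_congr
      intro p hp
      rw [hwc p]
    refine ⟨h1.1, hc2, hm2, ?_⟩
    rw [List.range_succ, List.countP_append]
    push_cast
    rw [← hres]
    simp only [List.countP_cons, List.countP_nil]
    have hcond : ((decide (9 ≤ (m : Int))) &&
        ((upd target x 1 (cnt, matched)).2 == ((target.keys.length : Nat) : Int)))
        = (decide (9 ≤ m) && goodW target (winOf discount (m + 1))) := by
      have e9 : decide (9 ≤ (m : Int)) = decide (9 ≤ m) := by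
        simp
      rw [e9, hm2]
      congr 1
      rw [Bool.eq_iff_iff]
      simp only [beq_iff_eq, Int.natCast_inj]
      rw [List.countP_eq_length]
      unfold goodW
      simp [List.all_eq_true]
    rw [hcond]
    split_ifs <;> simp


theorem cnt0_items (K : List String) (hK : K.Nodup) :
    (K.foldl (fun d p => d.insert p (0 : Int)) PySem.Dict.empty).items
      = K.map (fun p => (p, (0 : Int))) := by
  have h := PySem.Dict.items_foldl_insert_fresh K (fun p => p) (fun _ => (0 : Int))
    PySem.Dict.empty (fun a _ => PySem.Dict.contains_empty a) (by simpa using hK)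
  simpa using h

theorem cnt0_keys (K : List String) (hK : K.Nodup) :
    (K.foldl (fun d p => d.insert p (0 : Int)) PySem.Dict.empty).keys = K := by
  simp only [PySem.Dict.keys]
  rw [cnt0_items K hK, List.map_map]
  exact List.map_id K

theorem cnt0_getD (K : List String) (hK : K.Nodup) (p : String) (hp : p ∈ K) :
    (K.foldl (fun d p => d.insert p (0 : Int)) PySem.Dict.empty).getD p 0 = 0 := by
  apply PySem.Dict.getD_of_mem_items _ _ (by rw [cnt0_keys K hK]; exact hK)
  rw [cnt0_items K hK]
  exact List.mem_map.2 ⟨p, hp, rfl⟩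

theorem bFold_inv (target : PySem.Dict String Int) (discount : List String)
    (hK : target.keys.Nodup)
    (cnt0 : PySem.Dict String Int) (matched0 : Int)
    (hkeys0 : cnt0.keys = target.keys)
    (hc0 : ∀ p ∈ target.keys, cnt0.getD p 0 = 0)
    (hmat0 : matched0
      = (target.keys.countP (fun p => (0 : Int) == target.getD p 0) : Int)) :
    ∀ (m : Nat), m ≤ discount.length →
    (((PySem.List.enumerate discount 0).take m).foldl
        (bStep target discount ((target.keys.length : Int))) (cnt0, matched0, 0)).1.keys
      = target.keys ∧
    (∀ p ∈ target.keys,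
      (((PySem.List.enumerate discount 0).take m).foldl
        (bStep target discount ((target.keys.length : Int))) (cnt0, matched0, 0)).1.getD p 0
        = ((winOf discount m).count p : Int)) ∧
    ((((PySem.List.enumerate discount 0).take m).foldl
        (bStep target discount ((target.keys.length : Int))) (cnt0, matched0, 0)).2.1
      = (target.keys.countP
          (fun p => ((winOf discount m).count p : Int) == target.getD p 0) : Int)) ∧
    ((((PySem.List.enumerate discount 0).take m).foldl
        (bStep target discount ((target.keys.length : Int))) (cnt0, matched0, 0)).2.2
      = ((List.range m).countP
          (fun j => decide (9 ≤ j) && goodW target (winOf discount (j + 1))) : Int)) := by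
  intro m
  induction m with
  | zero =>
    intro _
    simp only [List.take_zero, List.foldl_nil]
    refine ⟨hkeys0, ?_, ?_, by simp⟩
    · intro p hp
      rw [hc0 p hp, win_zero]
      simp
    · rw [hmat0]
      congr 1
  | succ m ih =>
    intro hm1
    have hm : m < discount.length := by omega
    have hih := ih (by omega)
    rw [enum_take_succ discount m hm, List.foldl_append, List.foldl_cons, List.foldl_nil]
    exact bStep_inv target discount hK m hm _ _ _ hih.1 hih.2.1 hih.2.2.1 hih.2.2.2

theorem solution_21_alt_eq_spec (want : List String) (number : List Int) (discount : List String) :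
    solution_21_alt want number discount = (specN (bTarget want number) discount : Int) := by
  have hK := bTarget_nodup want number
  unfold solution_21_alt
  by_cases hlen : discount.length < 10
  · rw [if_pos hlen]
    unfold specN
    have : discount.length - 9 = 0 := by omega
    rw [this]
    simp
  · rw [if_neg hlen]
    have hsize : ((bTarget want number).size : Int) = ((bTarget want number).keys.length : Int) := by
      simp [PySem.Dict.size, PySem.Dict.keys]
    rw [hsize]
    have hkeys0 := cnt0_keys (bTarget want number).keys hK
    have hc0 := cnt0_getD (bTarget want number).keys hK
    have hmat0 : (bTarget want number).keys.foldl
        (fun a p => if (bTarget want number).getD p 0 == 0 then a + 1 else a) (0 : Int)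
        = ((bTarget want number).keys.countP
            (fun p => (0 : Int) == (bTarget want number).getD p 0) : Int) := by
      rw [PySem.List.foldl_count_if (fun p => (bTarget want number).getD p 0 == 0)
        (bTarget want number).keys 0]
      rw [Int.zero_add]
      congr 1
      apply List.countP_congr
      intro p _
      simp only [beq_iff_eq]
      exact eq_comm
    have hfull := bFold_inv (bTarget want number) discount hK _ _ hkeys0 hc0 hmat0
      discount.length (le_refl _)
    have htake : (PySem.List.enumerate discount 0).take discount.length
        = PySem.List.enumerate discount 0 := by
      apply List.take_of_length_le
      rw [PySem.List.length_enumerate]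
    rw [htake] at hfull
    rw [hfull.2.2.2]
    unfold specN
    congr 1
    rw [← countP_shift (fun i => goodW (bTarget want number) ((discount.drop i).take 10))
      discount.length]
    apply List.countP_congr
    intro j hj
    rw [List.mem_range] at hj
    by_cases h9 : 9 ≤ j
    · have e1 : winOf discount (j + 1) = (discount.drop (j - 9)).take 10 := by
        unfold winOf
        rw [List.drop_take]
        have e2 : j + 1 - (j + 1 - 10) = 10 := by omega
        have e3 : j + 1 - 10 = j - 9 := by omega
        rw [e2, e3]
      rw [e1]
    · simp [h9]

-- ===== VERDICT (by name: the statement is the Claim_ definition above) =====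
theorem solution_21_spec : Claim_equal_solution_21 := by
  intro want number discount _hdom hpre
  unfold Spec_solution_21
  rw [solution_21_eq_spec want number discount hpre, solution_21_alt_eq_spec]
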